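-- pv_equiv track=rewrite | github.com/Tocknicsu/nctuoj_contest | backend/service/base.py | gen_update_sql
-- ===== SOURCE A (Python) =====
-- from copy import copy
--
-- def gen_update_sql(tablename, _data):
--     data = copy(_data)
--     for col in _data:
--         if _data[col] is None:
--             del data[col]
--     sql = ''.join(' "%s" = %%s,'%col for col in data)[:-1]
--     param = tuple( val for val in data.values() )
--     sql = 'UPDATE "%s" SET %s '%(tablename, sql)
--     return (sql, param)
-- ===== SOURCE B (Python) =====
-- def gen_update_sql(tablename, _data):
--     def build(items):
--         if not items:
--             return ('', ())
--         col, val = items[0]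
--         sql, vals = build(items[1:])
--         if val is None:
--             return (sql, vals)
--         frag = ' "%s" = %%s' % col
--         if sql:
--             return (frag + ',' + sql, (val,) + vals)
--         return (frag, (val,) + vals)
--     sql, vals = build(list(_data.items()))
--     return ('UPDATE "%s" SET %s ' % (tablename, sql), vals)
-- ===== Notes on version B (the rewrite author's own statement) =====
-- stated objective: alternative
-- what changed: A recursive helper builds the SET clause and parameter tuple back-to-front over the item list (prepending each kept fragment, inserting ',' only when a non-empty suffix exists), replacing A's dict copy, delete-while-iterating loop, join-then-strip-trailing-comma and separate value comprehension.
import Mathlib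
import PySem

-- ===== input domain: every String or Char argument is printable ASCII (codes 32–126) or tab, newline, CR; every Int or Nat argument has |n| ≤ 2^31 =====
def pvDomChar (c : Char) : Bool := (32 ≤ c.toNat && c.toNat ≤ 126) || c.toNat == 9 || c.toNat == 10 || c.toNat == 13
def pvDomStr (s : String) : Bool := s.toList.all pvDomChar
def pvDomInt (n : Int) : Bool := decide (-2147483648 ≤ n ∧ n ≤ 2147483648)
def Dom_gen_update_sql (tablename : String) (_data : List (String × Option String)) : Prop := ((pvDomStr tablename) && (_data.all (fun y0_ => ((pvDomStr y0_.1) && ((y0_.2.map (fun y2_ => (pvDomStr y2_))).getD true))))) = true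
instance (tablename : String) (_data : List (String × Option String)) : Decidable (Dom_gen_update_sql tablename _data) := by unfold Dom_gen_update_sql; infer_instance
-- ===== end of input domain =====

-- B replaces A's dict copy + delete-while-iterating loop + join-then-strip-trailing-comma by a
-- recursive helper that builds the SET clause and parameter tuple back-to-front, inserting ','
-- only in front of a non-empty suffix (same return value; objective: alternative decomposition).

-- ===== PORT A =====
def gen_update_sql (tablename : String) (_data : List (String × Option String)) : String × List String :=
  -- the dict argument: the assoc list read as a Python dict (first position, last value wins)
  let d : PySem.Dict String (Option String) := PySem.Dict.ofList _data
  -- data = copy(_data); for col in _data: if _data[col] is None: del data[col]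
  let data : PySem.Dict String (Option String) :=
    d.keys.foldl (fun acc col => if d.getD col none == none then acc.erase col else acc) d
  -- sql = ''.join(' "%s" = %%s,' % col for col in data)[:-1]
  let sql : String :=
    String.ofList (PySem.List.slice
      (PySem.Chars.join [] (data.keys.map (fun col => (PySem.Str.join "" [" \"", col, "\" = %s,"]).toList)))
      none (some (-1)))
  -- param = tuple(val for val in data.values()); all values are non-None here, unwrapped to String
  let param : List String := data.values.filterMap (fun v => v)
  (PySem.Str.join "" ["UPDATE \"", tablename, "\" SET ", sql, " "], param)

-- ===== PORT B =====
-- frag = ' "%s" = %%s' % col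
def pvFrag (col : String) : String := PySem.Str.join "" [" \"", col, "\" = %s"]

-- def build(items): recursion over the item list, building the clause back-to-front
def pvBuild : List (String × Option String) → String × List String
  | [] => ("", [])
  | (col, val) :: rest =>
    let r := pvBuild rest
    match val with
    | none => r
    | some v =>
      if r.1.isEmpty then (pvFrag col, v :: r.2)
      else (PySem.Str.join "" [pvFrag col, ",", r.1], v :: r.2)

def gen_update_sql_alt (tablename : String) (_data : List (String × Option String)) : String × List String :=
  let r := pvBuild (PySem.Dict.ofList _data).items
  (PySem.Str.join "" ["UPDATE \"", tablename, "\" SET ", r.1, " "], r.2)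

-- ===== PRECONDITION & SPEC =====
def Spec_gen_update_sql (tablename : String) (_data : List (String × Option String)) (out : String × List String) : Prop := out = gen_update_sql_alt tablename _data
instance (tablename : String) (_data : List (String × Option String)) (out : String × List String) : Decidable (Spec_gen_update_sql tablename _data out) := by unfold Spec_gen_update_sql; infer_instance

-- ===== CLAIM (what is proved, stated in full; the proofs are below) =====
def Claim_equal_gen_update_sql : Prop := ∀ (tablename : String) (_data : List (String × Option String)), Dom_gen_update_sql tablename _data → Spec_gen_update_sql tablename _data (gen_update_sql tablename _data)

-- ===== LEMMAS AND PROOFS =====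

-- the kept entries: value is not None
def pvKeep (p : String × Option String) : Bool := !(p.2 == none)

-- A's delete loop leaves exactly the kept items, in order
lemma erase_loop_items (full : List (String × Option String))
    (hnd : (full.map Prod.fst).Nodup) :
    ∀ (rest done : List (String × Option String)), full = done ++ rest →
    ((rest.map Prod.fst).foldl
        (fun (acc : PySem.Dict String (Option String)) col =>
          if (PySem.Dict.mk full).getD col none == none then acc.erase col else acc)
        (PySem.Dict.mk (done.filter pvKeep ++ rest))).items
      = full.filter pvKeep := by
  intro rest
  induction rest with
  | nil =>
    intro done h
    simp [h]
  | cons p rest' ih =>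
    intro done h
    rcases p with ⟨c, v⟩
    have hsplit := hnd
    rw [h] at hsplit
    simp only [List.map_append, List.map_cons] at hsplit
    have hnodone : c ∉ done.map Prod.fst := by
      have := List.disjoint_of_nodup_append hsplit
      intro hc; exact (this hc) (by simp)
    have hnorest : c ∉ rest'.map Prod.fst := by
      have := (List.nodup_append.mp hsplit).2.1
      simpa using (List.nodup_cons.mp this).1
    have hfind : (PySem.Dict.mk full).getD c none = v := by
      simp only [PySem.Dict.getD, PySem.Dict.get?, h]
      rw [List.find?_append]
      have h1 : List.find? (fun p => p.1 == c) done = none := by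
        rw [List.find?_eq_none]
        intro x hx
        simp only [beq_iff_eq]
        intro he; exact hnodone (he ▸ List.mem_map_of_mem hx)
      simp [h1]
    rw [List.map_cons, List.foldl_cons, hfind]
    cases v with
    | none =>
      simp only [BEq.rfl, if_pos]
      have herase : (PySem.Dict.mk (done.filter pvKeep ++ (c, none) :: rest')).erase c
          = PySem.Dict.mk ((done ++ [(c, (none : Option String))]).filter pvKeep ++ rest') := by
        simp only [PySem.Dict.erase, List.filter_append]
        congr 1
        have h2 : (done.filter pvKeep).filter (fun p => !p.1 == c) = done.filter pvKeep := by
          rw [List.filter_eq_self]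
          intro x hx
          have : x.1 ≠ c := by
            intro he; exact hnodone (he ▸ List.mem_map_of_mem (List.mem_of_mem_filter hx))
          simp [this]
        have h3 : ((c, (none : Option String)) :: rest').filter (fun p => !p.1 == c) = rest' := by
          rw [List.filter_cons, if_neg (by simp)]
          rw [List.filter_eq_self]
          intro x hx
          have : x.1 ≠ c := by
            intro he; exact hnorest (he ▸ List.mem_map_of_mem hx)
          simp [this]
        rw [h2, h3]
        simp [pvKeep]
      rw [herase, ih (done ++ [(c, none)]) (by simp [h])]
    | some s =>
      rw [if_neg (by simp)]
      have hstart : done.filter pvKeep ++ (c, some s) :: rest'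
          = (done ++ [(c, some s)]).filter pvKeep ++ rest' := by
        simp [List.filter_append, pvKeep]
      rw [hstart, ih (done ++ [(c, some s)]) (by simp [h])]

-- the loop started on the whole dict
lemma erase_loop_items' (full : List (String × Option String))
    (hnd : (full.map Prod.fst).Nodup) :
    ((full.map Prod.fst).foldl
        (fun (acc : PySem.Dict String (Option String)) col =>
          if (PySem.Dict.mk full).getD col none == none then acc.erase col else acc)
        (PySem.Dict.mk full)).items
      = full.filter pvKeep := by
  simpa using erase_loop_items full hnd full [] rfl

lemma inter_nil (l : List (List Char)) : [].intercalate l = l.flatten := by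
  simp only [List.intercalate]
  induction l with
  | nil => simp
  | cons x t ih => cases t <;> simp_all [List.intersperse]

-- dropping the trailing comma of the concatenation = joining with ','
lemma join_comma (l : List (List Char)) :
    PySem.List.slice (PySem.Chars.join [] (l.map (· ++ [',']))) none (some (-1))
      = PySem.Chars.join [','] l := by
  rw [PySem.List.slice_to_neg_one]
  simp only [PySem.Chars.join, inter_nil]
  induction l with
  | nil => simp [List.intercalate]
  | cons x t ih =>
    cases t with
    | nil => simp [List.intercalate, List.intersperse]
    | cons y t' =>
      rw [List.map_cons, List.flatten_cons, List.append_assoc,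
          List.dropLast_append_of_ne_nil (by simp),
          List.dropLast_append_of_ne_nil (by simp), ih]
      simp [List.intercalate, List.intersperse]

lemma filterMap_keep (ds : List (String × Option String)) :
    ((ds.filter pvKeep).map Prod.snd).filterMap (fun v => v)
      = (ds.filter pvKeep).map (fun p => p.2.getD "") := by
  induction ds with
  | nil => simp
  | cons p rest ih =>
    rcases p with ⟨c, v⟩
    cases v with
    | none => simpa [pvKeep] using ih
    | some s => simpa [pvKeep] using ih

-- a comma-terminated fragment is the plain fragment plus ','
lemma piece_comma (c : String) :
    (PySem.Str.join "" [" \"", c, "\" = %s,"]).toList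
      = (pvFrag c).toList ++ [','] := by
  simp [pvFrag, PySem.Str.join, PySem.Chars.join, List.intercalate]

-- a fragment starts with a space, so it is never empty
lemma frag_toList (c : String) : (pvFrag c).toList = ' ' :: ('"' :: c.toList ++ "\" = %s".toList) := by
  simp [pvFrag, PySem.Str.join, PySem.Chars.join, List.intercalate]

lemma isEmpty_toList (s : String) : s.isEmpty = true ↔ s.toList = [] := by
  rw [String.isEmpty_iff]
  constructor
  · intro h; simp [h]
  · intro h; exact String.toList_eq_nil_iff.mp h

-- a join headed by a fragment is non-empty
lemma join_frag_ne_nil (q : String) (t : List (List Char)) :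
    PySem.Chars.join [','] ((pvFrag q).toList :: t) ≠ [] := by
  cases t with
  | nil => simp [PySem.Chars.join, List.intercalate, List.intersperse, frag_toList]
  | cons y t' => rw [PySem.Chars.join_cons_cons]; simp [frag_toList]

-- B's recursive builder produces the ','-joined kept fragments and the kept values
lemma build_eq (ds : List (String × Option String)) :
    (pvBuild ds).1.toList
        = PySem.Chars.join [','] ((ds.filter pvKeep).map (fun p => (pvFrag p.1).toList))
      ∧ (pvBuild ds).2 = (ds.filter pvKeep).map (fun p => p.2.getD "") := by
  induction ds with
  | nil => simp [pvBuild, PySem.Chars.join, List.intercalate]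
  | cons p rest ih =>
    rcases p with ⟨c, v⟩
    obtain ⟨ih1, ih2⟩ := ih
    cases v with
    | none => simpa [pvBuild, pvKeep] using ⟨ih1, ih2⟩
    | some s =>
      have hfc : (((c, some s) :: rest).filter pvKeep) = (c, some s) :: rest.filter pvKeep := by
        simp [pvKeep]
      simp only [pvBuild, hfc, List.map_cons]
      by_cases he : (pvBuild rest).1.isEmpty
      · -- no suffix: the tail keeps nothing
        have hnilc : (pvBuild rest).1.toList = [] := (isEmpty_toList _).mp he
        have hnil : (rest.filter pvKeep).map (fun p => (pvFrag p.1).toList) = [] := by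
          cases hl : (rest.filter pvKeep).map (fun p => (pvFrag p.1).toList) with
          | nil => rfl
          | cons x t =>
            exfalso
            rw [hl, hnilc] at ih1
            obtain ⟨q, hq, hx⟩ := List.exists_of_mem_map
              (show x ∈ (rest.filter pvKeep).map (fun p => (pvFrag p.1).toList) from by
                rw [hl]; exact List.mem_cons_self ..)
            rw [← hx] at ih1
            exact join_frag_ne_nil q.1 t ih1.symm
        refine ⟨?_, by simp [ih2, he]⟩
        simp [he, hnil, PySem.Chars.join, List.intercalate]
      · -- non-empty suffix: join picks up the comma
        have hcons : ∃ x t, (rest.filter pvKeep).map (fun p => (pvFrag p.1).toList) = x :: t := by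
          cases hl : (rest.filter pvKeep).map (fun p => (pvFrag p.1).toList) with
          | nil =>
            exfalso
            rw [hl] at ih1
            simp [PySem.Chars.join, List.intercalate] at ih1
            exact he (by simp [ih1])
          | cons x t => exact ⟨x, t, rfl⟩
        obtain ⟨x, t, hl⟩ := hcons
        refine ⟨?_, by simp [ih2, he]⟩
        simp only [he, if_false, Bool.false_eq_true]
        rw [hl, PySem.Chars.join_cons_cons]
        simp [PySem.Str.join, PySem.Chars.join, List.intercalate, List.intersperse, ih1, hl]

-- ===== VERDICT (by name: the statement is the Claim_ definition above) =====
theorem gen_update_sql_spec : Claim_equal_gen_update_sql := by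
  intro t xs _
  unfold Spec_gen_update_sql
  simp only [gen_update_sql, gen_update_sql_alt]
  have hnd : ((PySem.Dict.ofList xs : PySem.Dict String (Option String)).items.map Prod.fst).Nodup := by
    have := PySem.Dict.nodup_keys_ofList (κ := String) (ν := Option String) xs
    simpa [PySem.Dict.keys] using this
  generalize hD : (PySem.Dict.ofList xs : PySem.Dict String (Option String)) = D at *
  obtain ⟨full⟩ := D
  obtain ⟨hb1, hb2⟩ := build_eq full
  simp only [PySem.Dict.keys, PySem.Dict.values]
  rw [erase_loop_items' full hnd]
  simp only [Prod.mk.injEq]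
  constructor
  · -- the SQL strings agree
    have hmap : List.map ((fun col : String => (PySem.Str.join "" [" \"", col, "\" = %s,"]).toList) ∘ (fun x : String × Option String => x.1)) (full.filter pvKeep)
        = List.map (· ++ [',']) (List.map (fun p : String × Option String => (pvFrag p.1).toList) (full.filter pvKeep)) := by
      simp only [List.map_map]
      exact List.map_congr_left (fun p _ => piece_comma p.1)
    simp only [List.map_map]
    rw [hmap, join_comma, ← hb1]
    simp [PySem.Str.join, PySem.Chars.join, List.intercalate, String.ofList]
  · -- the parameter lists agree
    rw [hb2]
    simpa using filterMap_keep full
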